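-- pv_equiv track=rewrite | github.com/PPMark0712/datatrove | src/datatrove/pipeline/cdf_gc/gc_calculator.py | calc_tree_height
-- ===== SOURCE A (Python) =====
-- def calc_tree_height(parents: list[int]) -> int:
--     n = len(parents)
--     heights = [-1] * n
--
--     def get_height(i: int) -> int:
--         if parents[i] == -1:
--             return 0
--         if heights[i] != -1:
--             return heights[i]
--         heights[i] = get_height(parents[i]) + 1
--         return heights[i]
--
--     return max(get_height(i) for i in range(n))
-- ===== SOURCE B (Python) =====
-- def calc_tree_height(parents):
--     n = len(parents)
--     children = [[] for _ in range(n)]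
--     frontier = []  # the roots: depth 0
--     for i, p in enumerate(parents):
--         if p == -1:
--             frontier.append(i)
--         else:
--             children[p].append(i)
--     depths = []
--     depth = 0
--     while frontier:
--         depths.extend([depth] * len(frontier))
--         frontier = [c for i in frontier for c in children[i]]
--         depth += 1
--     return max(depths)
-- ===== Notes on version B (the rewrite author's own statement) =====
-- stated objective: alternative
-- what changed: Replaces A's memoized bottom-up recursion along parent pointers by building a children adjacency index in one scan and then peeling the forest top-down level by level from the roots, returning the number of non-empty levels minus one.
import Mathlib
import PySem

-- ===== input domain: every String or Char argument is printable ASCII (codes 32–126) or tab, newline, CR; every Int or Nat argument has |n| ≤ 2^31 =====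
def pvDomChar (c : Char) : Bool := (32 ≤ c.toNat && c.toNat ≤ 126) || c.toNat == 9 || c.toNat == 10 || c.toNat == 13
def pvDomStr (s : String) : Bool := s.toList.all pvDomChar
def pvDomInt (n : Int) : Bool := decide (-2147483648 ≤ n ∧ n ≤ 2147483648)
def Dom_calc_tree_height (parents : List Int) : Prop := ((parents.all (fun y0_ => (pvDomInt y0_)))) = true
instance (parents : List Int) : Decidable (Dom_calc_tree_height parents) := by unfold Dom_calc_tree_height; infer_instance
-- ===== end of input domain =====

-- B replaces A's memoized pull-up recursion by a root-to-leaves BFS over a freshly built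
-- children index (alternative decomposition; same O(n) cost). Return values only; neither
-- version mutates its argument.

-- ===== PORT A =====
-- get_height: memoized recursion, threading the mutable `heights` list; the fuel bounds the
-- recursion depth (Python raises RecursionError on cyclic input — excluded by Pre_, as are the
-- IndexError cases, so the `getD` defaults and the fuel-0 branch are unreachable under Pre_).
def getHeightA (parents : List Int) : Nat → List Int → Int → Int × List Int
  | 0, heights, _ => (0, heights)
  | fuel+1, heights, i =>
    if (PySem.List.pyGet? parents i).getD 0 = -1 then (0, heights)
    else if (PySem.List.pyGet? heights i).getD 0 ≠ -1 then
      ((PySem.List.pyGet? heights i).getD 0, heights)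
    else
      let r := getHeightA parents fuel heights ((PySem.List.pyGet? parents i).getD 0)
      (r.1 + 1, PySem.List.pySetD r.2 i (r.1 + 1))

def calc_tree_height (parents : List Int) : Int :=
  let n := parents.length
  let heights : List Int := List.replicate n (-1)
  let res := (List.range n).foldl
    (fun (acc : List Int × List Int) (j : Nat) =>
      let r := getHeightA parents (n+1) acc.2 (j : Int)
      (acc.1 ++ [r.1], r.2))
    ([], heights)
  (PySem.List.max? res.1 (fun x => x)).getD 0  -- max() of an empty sequence raises ValueError: excluded by Pre_

-- ===== PORT B =====
-- build children[p] (Python's children[p].append(i) indexes with p, wrapping negative p) and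
-- the root frontier, then peel the forest level by level, recording every node's depth.
def bfsLoopB (children : List (List Nat)) : Nat → List Nat → List Int → Int → List Int
  | 0, _, depths, _ => depths  -- fuel exhausted: unreachable under Pre_ (there are ≤ n levels)
  | fuel+1, frontier, depths, depth =>
    if frontier = [] then depths
    else bfsLoopB children fuel (frontier.flatMap (fun i => children.getD i []))
      (depths ++ List.replicate frontier.length depth) (depth + 1)

def calc_tree_height_alt (parents : List Int) : Int :=
  let n := parents.length
  let cr := (PySem.List.enumerate parents).foldl
    (fun (acc : List (List Nat) × List Nat) ip =>
      if ip.2 = -1 then (acc.1, acc.2 ++ [ip.1.toNat])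
      else (PySem.List.pySetD acc.1 ip.2 (PySem.List.pyGetD acc.1 ip.2 [] ++ [ip.1.toNat]), acc.2))
    (List.replicate n [], [])
  let depths := bfsLoopB cr.1 (n+1) cr.2 [] 0
  (PySem.List.max? depths (fun x => x)).getD 0  -- max() of an empty sequence raises ValueError: excluded by Pre_

-- ===== PRECONDITION & SPEC =====
def pvPar (parents : List Int) (j : Nat) : Int := parents.getD j (-1)
def pvNrm (n : Nat) (p : Int) : Nat := (if p < 0 then p + (n : Int) else p).toNat
def pvStep (parents : List Int) (p : Int) : Int :=
  if p = -1 then -1 else pvPar parents (pvNrm parents.length p)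

-- Pre_ excludes exactly the inputs on which A raises: the empty list (ValueError from max()),
-- an entry outside [-n, n) (IndexError; -1 marks a root, other negative entries wrap as Python
-- indices do), and cyclic parent chains (RecursionError): acyclicity is stated as "the n-fold
-- parent map sends every node to -1".
def Pre_calc_tree_height (parents : List Int) : Prop :=
  parents ≠ [] ∧
  (∀ p ∈ parents, -(parents.length : Int) ≤ p ∧ p < parents.length) ∧
  (∀ j ∈ List.range parents.length, (pvStep parents)^[parents.length] (j : Int) = -1)
instance (parents : List Int) : Decidable (Pre_calc_tree_height parents) := by
  unfold Pre_calc_tree_height; infer_instance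

def pvWitness_calc_tree_height : List Int := [-1, 0, 0, 1, -1]

def Spec_calc_tree_height (parents : List Int) (out : Int) : Prop := out = calc_tree_height_alt parents
instance (parents : List Int) (out : Int) : Decidable (Spec_calc_tree_height parents out) := by
  unfold Spec_calc_tree_height; infer_instance

-- ===== CLAIM (what is proved, stated in full; the proofs are below) =====
def Claim_equal_calc_tree_height : Prop := ∀ (parents : List Int), Dom_calc_tree_height parents → Pre_calc_tree_height parents → Spec_calc_tree_height parents (calc_tree_height parents)

-- ===== LEMMAS AND PROOFS =====

-- the true height of node j, computed by a fueled pull-up with no memo (proof device)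
def pvH (parents : List Int) : Nat → Nat → Option Nat
  | 0, _ => none
  | f+1, j =>
    let p := pvPar parents j
    if p = -1 then some 0
    else (pvH parents f (pvNrm parents.length p)).map (· + 1)

def pvHt (parents : List Int) (j : Nat) : Nat := (pvH parents parents.length j).getD 0

theorem pvNrm_natCast (n j : Nat) : pvNrm n (j : Int) = j := by
  unfold pvNrm; split_ifs <;> omega

theorem pvNrm_lt {n : Nat} {p : Int} (h1 : -(n : Int) ≤ p) (h2 : p < n) : pvNrm n p < n := by
  unfold pvNrm
  split_ifs with h <;> omega

theorem pyIdx?_eq_nrm {n : Nat} {i : Int} (h1 : -(n : Int) ≤ i) (h2 : i < n) :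
    PySem.List.pyIdx? n i = some (pvNrm n i) := by
  simp only [PySem.List.pyIdx?, pvNrm]
  split_ifs <;> simp only [Option.some.injEq] <;> omega

theorem pyGet?_getD {α : Type} {xs : List α} {i : Int} {d : α} {n : Nat}
    (hl : xs.length = n) (h1 : -(n : Int) ≤ i) (h2 : i < n) :
    (PySem.List.pyGet? xs i).getD d = xs.getD (pvNrm n i) d := by
  unfold PySem.List.pyGet?
  rw [hl, pyIdx?_eq_nrm h1 h2, List.getD_eq_getElem?_getD]
  simp

theorem pyGet?_eq_par {parents : List Int} {i : Int}
    (h1 : -(parents.length : Int) ≤ i) (h2 : i < parents.length) :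
    (PySem.List.pyGet? parents i).getD 0 = pvPar parents (pvNrm parents.length i) := by
  rw [pyGet?_getD rfl h1 h2]
  unfold pvPar
  rw [List.getD_eq_getElem _ _ (pvNrm_lt h1 h2), List.getD_eq_getElem _ _ (pvNrm_lt h1 h2)]

theorem pySetD_eq_set {α : Type} {xs : List α} {i : Int} {v : α} {n : Nat}
    (hl : xs.length = n) (h1 : -(n : Int) ≤ i) (h2 : i < n) :
    PySem.List.pySetD xs i v = xs.set (pvNrm n i) v := by
  unfold PySem.List.pySetD PySem.List.pySet?
  rw [hl, pyIdx?_eq_nrm h1 h2]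
  simp

theorem par_mem {parents : List Int} {j : Nat} (hj : j < parents.length) :
    pvPar parents j ∈ parents := by
  unfold pvPar
  rw [List.getD_eq_getElem _ _ hj]
  exact List.getElem_mem hj

-- abbreviation: validity of all entries
def pvValid (parents : List Int) : Prop :=
  ∀ p ∈ parents, -(parents.length : Int) ≤ p ∧ p < parents.length

theorem pvH_mono {parents : List Int} {f j k : Nat}
    (h : pvH parents f j = some k) : pvH parents (f+1) j = some k := by
  induction f generalizing j k with
  | zero => simp [pvH] at h
  | succ f ih =>
    rw [pvH] at h ⊢
    by_cases hp : pvPar parents j = -1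
    · simpa [hp] using h
    · simp only [hp, ite_false, Option.map_eq_some_iff] at h ⊢
      obtain ⟨k', hk', rfl⟩ := h
      exact ⟨k', ih hk', rfl⟩

theorem pvH_le {parents : List Int} {f f' j : Nat} (hf : f ≤ f') {k : Nat}
    (h : pvH parents f j = some k) : pvH parents f' j = some k := by
  obtain ⟨d, rfl⟩ := Nat.exists_eq_add_of_le hf
  clear hf
  induction d with
  | zero => exact h
  | succ d ih => exact pvH_mono ih

theorem pvH_lt {parents : List Int} {f j k : Nat}
    (h : pvH parents f j = some k) : k < f := by
  induction f generalizing j k with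
  | zero => simp [pvH] at h
  | succ f ih =>
    rw [pvH] at h
    by_cases hp : pvPar parents j = -1
    · simp [hp] at h
      omega
    · simp only [hp, ite_false, Option.map_eq_some_iff] at h
      obtain ⟨k', hk', rfl⟩ := h
      exact Nat.succ_lt_succ (ih hk')

theorem pvStep_natCast (parents : List Int) (j : Nat) :
    pvStep parents (j : Int) = pvPar parents j := by
  simp [pvStep, pvNrm_natCast]

theorem pvH_total {parents : List Int} (hv : pvValid parents) :
    ∀ f j, j < parents.length → (pvStep parents)^[f] (j : Int) = -1 →
      (pvH parents f j).isSome := by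
  intro f
  induction f with
  | zero =>
    intro j hj hit
    simp only [Function.iterate_zero, id] at hit
    omega
  | succ f ih =>
    intro j hj hit
    rw [pvH]
    by_cases hp : pvPar parents j = -1
    · simp [hp]
    · have hmem := par_mem hj
      obtain ⟨hl, hr⟩ := hv _ hmem
      have hj' : pvNrm parents.length (pvPar parents j) < parents.length := pvNrm_lt hl hr
      rw [Function.iterate_succ_apply, pvStep_natCast] at hit
      cases f with
      | zero =>
        simp only [Function.iterate_zero, id] at hit
        exact absurd hit hp
      | succ g =>
        have hstep : pvStep parents (pvPar parents j) =
            pvStep parents ((pvNrm parents.length (pvPar parents j) : Nat) : Int) := by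
          rw [pvStep_natCast]
          simp [pvStep, hp]
        rw [Function.iterate_succ_apply, hstep, ← Function.iterate_succ_apply] at hit
        have := ih (pvNrm parents.length (pvPar parents j)) hj' hit
        simp only [hp, ite_false]
        simpa using this

-- under Pre_, every node's height is defined
theorem pre_HS {parents : List Int} (hpre : Pre_calc_tree_height parents) :
    ∀ j, j < parents.length → (pvH parents parents.length j).isSome := by
  intro j hj
  exact pvH_total hpre.2.1 parents.length j hj (hpre.2.2 j (List.mem_range.mpr hj))

-- recurrence for pvHt
theorem pvHt_root {parents : List Int} {j : Nat} (hn : parents ≠ [])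
    (hp : pvPar parents j = -1) : pvHt parents j = 0 := by
  have hl : parents.length ≠ 0 := by simpa using hn
  unfold pvHt
  obtain ⟨m, hm⟩ := Nat.exists_eq_succ_of_ne_zero hl
  rw [hm]
  simp [pvH, hp]

theorem pvHt_step {parents : List Int} {j : Nat}
    (hs : (pvH parents parents.length j).isSome)
    (hp : pvPar parents j ≠ -1) :
    pvHt parents j = pvHt parents (pvNrm parents.length (pvPar parents j)) + 1 ∧
      (pvH parents parents.length (pvNrm parents.length (pvPar parents j))).isSome := by
  obtain ⟨k, hk⟩ := Option.isSome_iff_exists.mp hs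
  have hl : parents.length ≠ 0 := by
    intro h0
    rw [h0] at hk
    simp [pvH] at hk
  obtain ⟨m, hm⟩ := Nat.exists_eq_succ_of_ne_zero hl
  rw [hm, pvH] at hk
  simp only [hp, ite_false, Option.map_eq_some_iff] at hk
  obtain ⟨k', hk', rfl⟩ := hk
  have h2 : pvH parents parents.length (pvNrm parents.length (pvPar parents j)) = some k' :=
    pvH_le (by omega) hk'
  have hj2 : pvH parents parents.length j = some (k' + 1) := by
    rw [hm, pvH]
    simp only [hp, ite_false, hk']
    rfl
  refine ⟨?_, by rw [h2]; rfl⟩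
  unfold pvHt
  rw [hj2, h2]
  rfl

theorem pvHt_bound {parents : List Int} {j : Nat}
    (hs : (pvH parents parents.length j).isSome) :
    pvHt parents j < parents.length := by
  obtain ⟨k, hk⟩ := Option.isSome_iff_exists.mp hs
  unfold pvHt
  rw [hk]
  exact pvH_lt hk

-- ---------- A side ----------

def pvInv (parents heights : List Int) : Prop :=
  heights.length = parents.length ∧
  ∀ j, j < parents.length →
    heights.getD j 0 = -1 ∨ heights.getD j 0 = (pvHt parents j : Int)

theorem getD_set' {α : Type} {l : List α} {jj j2 : Nat} {d v : α} (h : jj < l.length) :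
    (l.set jj v).getD j2 d = if jj = j2 then v else l.getD j2 d := by
  simp only [List.getD_eq_getElem?_getD, List.getElem?_set]
  split_ifs with h1 <;> simp_all

theorem getHeightA_spec {parents : List Int}
    (hpre : Pre_calc_tree_height parents) :
    ∀ fuel (i : Int) heights,
      -(parents.length : Int) ≤ i → i < parents.length →
      pvInv parents heights →
      pvHt parents (pvNrm parents.length i) < fuel →
      (getHeightA parents fuel heights i).1 = (pvHt parents (pvNrm parents.length i) : Int) ∧
      pvInv parents (getHeightA parents fuel heights i).2 := by
  have hv := hpre.2.1
  have hHS := pre_HS hpre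
  intro fuel
  induction fuel with
  | zero =>
    intro i heights _ _ _ hfuel
    omega
  | succ fuel ih =>
    intro i heights h1 h2 hinv hfuel
    have hjlt : pvNrm parents.length i < parents.length := pvNrm_lt h1 h2
    have hpar : (PySem.List.pyGet? parents i).getD 0 = pvPar parents (pvNrm parents.length i) :=
      pyGet?_eq_par h1 h2
    have hread : (PySem.List.pyGet? heights i).getD 0 = heights.getD (pvNrm parents.length i) 0 :=
      pyGet?_getD hinv.1 h1 h2
    rw [getHeightA, hpar, hread]
    by_cases hp : pvPar parents (pvNrm parents.length i) = -1
    · rw [if_pos hp]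
      exact ⟨(by rw [pvHt_root hpre.1 hp]; rfl), hinv⟩
    · rw [if_neg hp]
      obtain ⟨hrec, hs'⟩ := pvHt_step (hHS _ hjlt) hp
      by_cases hmemo : heights.getD (pvNrm parents.length i) 0 ≠ -1
      · rw [if_pos hmemo]
        rcases hinv.2 _ hjlt with hc | hc
        · exact absurd hc hmemo
        · exact ⟨hc, hinv⟩
      · rw [if_neg hmemo]
        obtain ⟨hpl, hpr⟩ := hv _ (par_mem hjlt)
        have hj'lt : pvNrm parents.length (pvPar parents (pvNrm parents.length i)) <
            parents.length := pvNrm_lt hpl hpr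
        have hfuel' :
            pvHt parents (pvNrm parents.length (pvPar parents (pvNrm parents.length i))) < fuel := by
          omega
        obtain ⟨hr1, hr2⟩ := ih (pvPar parents (pvNrm parents.length i)) heights hpl hpr hinv hfuel'
        have hset : PySem.List.pySetD
              (getHeightA parents fuel heights (pvPar parents (pvNrm parents.length i))).2 i
              ((getHeightA parents fuel heights (pvPar parents (pvNrm parents.length i))).1 + 1) =
            (getHeightA parents fuel heights (pvPar parents (pvNrm parents.length i))).2.set
              (pvNrm parents.length i)
              ((getHeightA parents fuel heights (pvPar parents (pvNrm parents.length i))).1 + 1) :=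
          pySetD_eq_set hr2.1 h1 h2
        refine ⟨?_, ?_⟩
        · simp only [hr1, hrec]
          push_cast
          ring
        · constructor
          · simp only [hset, List.length_set]
            exact hr2.1
          · intro j2 hj2
            simp only [hset]
            rw [getD_set' (by rw [hr2.1]; exact hjlt)]
            split_ifs with he
            · right
              rw [hr1, ← he, hrec]
              push_cast
              ring
            · exact hr2.2 j2 hj2

theorem foldA_spec {parents : List Int} (hpre : Pre_calc_tree_height parents) :
    ∀ (js : List Nat) (vals heights : List Int), pvInv parents heights →
      (∀ j ∈ js, j < parents.length) →
      (js.foldl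
        (fun (acc : List Int × List Int) (j : Nat) =>
          let r := getHeightA parents (parents.length + 1) acc.2 (j : Int)
          (acc.1 ++ [r.1], r.2)) (vals, heights)).1 =
        vals ++ js.map (fun j => (pvHt parents j : Int)) := by
  intro js
  induction js with
  | nil => intro vals heights _ _; simp
  | cons j js ih =>
    intro vals heights hinv hmem
    have hj : j < parents.length := hmem j List.mem_cons_self
    have h1 : -(parents.length : Int) ≤ (j : Int) := by omega
    have h2 : (j : Int) < parents.length := by exact_mod_cast hj
    have hfuel : pvHt parents (pvNrm parents.length (j : Int)) < parents.length + 1 := by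
      rw [pvNrm_natCast]
      exact Nat.lt_succ_of_lt (pvHt_bound (pre_HS hpre j hj))
    obtain ⟨hr1, hr2⟩ := getHeightA_spec hpre (parents.length + 1) (j : Int) heights h1 h2 hinv hfuel
    rw [pvNrm_natCast] at hr1
    simp only [List.foldl_cons, List.map_cons]
    rw [ih (vals ++ [(getHeightA parents (parents.length + 1) heights (j : Int)).1])
      (getHeightA parents (parents.length + 1) heights (j : Int)).2 hr2
      (fun x hx => hmem x (List.mem_cons_of_mem _ hx)), hr1]
    simp

theorem calc_A_eq {parents : List Int} (hpre : Pre_calc_tree_height parents) :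
    calc_tree_height parents =
      (PySem.List.max? ((List.range parents.length).map (fun j => (pvHt parents j : Int)))
        (fun x => x)).getD 0 := by
  unfold calc_tree_height
  have hinv : pvInv parents (List.replicate parents.length (-1 : Int)) := by
    constructor
    · simp
    · intro j hj
      left
      simp [List.getD_eq_getElem?_getD, hj]
  simp only [foldA_spec hpre (List.range parents.length) []
    (List.replicate parents.length (-1)) hinv (fun j hj => List.mem_range.mp hj),
    List.nil_append]

-- ---------- B side ----------

def pvChildrenRoots (parents : List Int) : List (List Nat) × List Nat :=
  (PySem.List.enumerate parents).foldl
    (fun (acc : List (List Nat) × List Nat) ip =>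
      if ip.2 = -1 then (acc.1, acc.2 ++ [ip.1.toNat])
      else (PySem.List.pySetD acc.1 ip.2 (PySem.List.pyGetD acc.1 ip.2 [] ++ [ip.1.toNat]), acc.2))
    (List.replicate parents.length [], [])

theorem children_spec {parents : List Int} (hv : pvValid parents) :
    (pvChildrenRoots parents).1.length = parents.length ∧
    (∀ i, i < parents.length →
      (pvChildrenRoots parents).1.getD i [] =
        (List.range parents.length).filter
          (fun j => pvPar parents j ≠ -1 ∧ pvNrm parents.length (pvPar parents j) = i)) ∧
    (pvChildrenRoots parents).2 =
      (List.range parents.length).filter (fun j => pvPar parents j = -1) := by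
  suffices h : ∀ k, k ≤ parents.length →
      (((PySem.List.enumerate (parents.take k)).foldl
        (fun (acc : List (List Nat) × List Nat) ip =>
          if ip.2 = -1 then (acc.1, acc.2 ++ [ip.1.toNat])
          else (PySem.List.pySetD acc.1 ip.2 (PySem.List.pyGetD acc.1 ip.2 [] ++ [ip.1.toNat]),
            acc.2))
        (List.replicate parents.length [], [])).1.length = parents.length ∧
      (∀ i, i < parents.length →
        ((PySem.List.enumerate (parents.take k)).foldl
          (fun (acc : List (List Nat) × List Nat) ip =>
            if ip.2 = -1 then (acc.1, acc.2 ++ [ip.1.toNat])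
            else (PySem.List.pySetD acc.1 ip.2 (PySem.List.pyGetD acc.1 ip.2 [] ++ [ip.1.toNat]),
              acc.2))
          (List.replicate parents.length [], [])).1.getD i [] =
          (List.range k).filter
            (fun j => pvPar parents j ≠ -1 ∧ pvNrm parents.length (pvPar parents j) = i)) ∧
      ((PySem.List.enumerate (parents.take k)).foldl
        (fun (acc : List (List Nat) × List Nat) ip =>
          if ip.2 = -1 then (acc.1, acc.2 ++ [ip.1.toNat])
          else (PySem.List.pySetD acc.1 ip.2 (PySem.List.pyGetD acc.1 ip.2 [] ++ [ip.1.toNat]),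
            acc.2))
        (List.replicate parents.length [], [])).2 =
        (List.range k).filter (fun j => pvPar parents j = -1)) by
    have hfin := h parents.length le_rfl
    rw [List.take_length] at hfin
    exact hfin
  intro k
  induction k with
  | zero =>
    intro _
    refine ⟨by simp, ?_, by simp⟩
    intro i hi
    simp [List.getD_eq_getElem?_getD, hi]
  | succ k ih =>
    intro hk1
    have hk : k < parents.length := hk1
    obtain ⟨hlen, hch, hrt⟩ := ih (le_of_lt hk)
    have hpk : parents[k] = pvPar parents k := by
      rw [pvPar, List.getD_eq_getElem _ _ hk]
    have htake : parents.take (k+1) = parents.take k ++ [pvPar parents k] := by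
      rw [List.take_add_one, List.getElem?_eq_getElem hk]
      simp [hpk]
    have hlentake : (parents.take k).length = k := by
      simp [List.length_take]
      omega
    set acc := (PySem.List.enumerate (parents.take k)).foldl
      (fun (acc : List (List Nat) × List Nat) ip =>
        if ip.2 = -1 then (acc.1, acc.2 ++ [ip.1.toNat])
        else (PySem.List.pySetD acc.1 ip.2 (PySem.List.pyGetD acc.1 ip.2 [] ++ [ip.1.toNat]),
          acc.2))
      (List.replicate parents.length [], []) with hacc
    rw [htake, PySem.List.enumerate_append, List.foldl_append, hlentake, ← hacc]
    simp only [PySem.List.enumerate_cons, PySem.List.enumerate_nil, List.foldl_cons,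
      List.foldl_nil, zero_add]
    by_cases hp : pvPar parents k = -1
    · rw [if_pos (show (((k : Int), pvPar parents k)).2 = -1 from hp)]
      refine ⟨hlen, ?_, ?_⟩
      · intro i hi
        dsimp only
        rw [hch i hi, List.range_succ, List.filter_append]
        simp [hp]
      · dsimp only
        rw [hrt, List.range_succ, List.filter_append]
        simp [hp]
    · obtain ⟨hpl, hpr⟩ := hv _ (par_mem hk)
      have hplt : pvNrm parents.length (pvPar parents k) < parents.length := pvNrm_lt hpl hpr
      have hgd : PySem.List.pyGetD acc.1 (pvPar parents k) [] =
          (List.range k).filter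
            (fun j => pvPar parents j ≠ -1 ∧
              pvNrm parents.length (pvPar parents j) = pvNrm parents.length (pvPar parents k)) := by
        rw [PySem.List.pyGetD, pyGet?_getD hlen hpl hpr]
        exact hch _ hplt
      have hsd : ∀ v : List Nat, PySem.List.pySetD acc.1 (pvPar parents k) v =
          acc.1.set (pvNrm parents.length (pvPar parents k)) v :=
        fun v => pySetD_eq_set hlen hpl hpr
      rw [if_neg (by simpa using hp)]
      refine ⟨?_, ?_, ?_⟩
      · dsimp only
        rw [hsd, List.length_set]
        exact hlen
      · intro i hi
        dsimp only
        rw [hsd, getD_set' (by rw [hlen]; exact hplt), hgd, List.range_succ, List.filter_append]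
        by_cases he : pvNrm parents.length (pvPar parents k) = i
        · rw [if_pos he, ← he]
          simp [hp]
        · rw [if_neg he, hch i hi]
          simp [hp, he]
      · dsimp only
        rw [List.range_succ, List.filter_append, hrt]
        simp [hp]

-- the maximum height
def pvM (parents : List Int) : Nat :=
  (List.range parents.length).foldl (fun acc j => max acc (pvHt parents j)) 0

theorem pvM_le {parents : List Int} {j : Nat} (hj : j < parents.length) :
    pvHt parents j ≤ pvM parents := by
  unfold pvM
  exact (PySem.List.le_foldl_max_nat (List.range parents.length) (pvHt parents) 0).2 _
    (List.mem_range.mpr hj)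

theorem pred_exists {parents : List Int} (hpre : Pre_calc_tree_height parents) {j k : Nat}
    (hj : j < parents.length) (h : pvHt parents j = k + 1) :
    ∃ j2, j2 < parents.length ∧ pvHt parents j2 = k := by
  have hs := pre_HS hpre j hj
  have hp : pvPar parents j ≠ -1 := by
    intro hroot
    rw [pvHt_root hpre.1 hroot] at h
    omega
  obtain ⟨hrec, _⟩ := pvHt_step hs hp
  obtain ⟨hpl, hpr⟩ := hpre.2.1 _ (par_mem hj)
  exact ⟨_, pvNrm_lt hpl hpr, by omega⟩

theorem pvM_attained {parents : List Int} (hpre : Pre_calc_tree_height parents) :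
    ∀ k ≤ pvM parents, ∃ j, j < parents.length ∧ pvHt parents j = k := by
  have hn : 0 < parents.length := List.length_pos_of_ne_nil hpre.1
  have hfm : pvM parents = ((List.range parents.length).map (pvHt parents)).foldl max 0 := by
    unfold pvM
    rw [List.foldl_map]
  have htop : ∃ j, j < parents.length ∧ pvHt parents j = pvM parents := by
    rcases PySem.List.foldl_max_mem ((List.range parents.length).map (pvHt parents)) 0 with
      hz | hm
    · refine ⟨0, hn, ?_⟩
      have hle := pvM_le (parents := parents) hn
      rw [hfm, hz] at hle ⊢
      omega
    · obtain ⟨j, hjm, hje⟩ := List.mem_map.mp hm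
      exact ⟨j, List.mem_range.mp hjm, by rw [hje, ← hfm]⟩
  have hdown : ∀ k, (∃ j, j < parents.length ∧ pvHt parents j = k) →
      ∀ m, m ≤ k → ∃ j, j < parents.length ∧ pvHt parents j = m := by
    intro k
    induction k with
    | zero =>
      intro h m hm
      interval_cases m
      exact h
    | succ k ih =>
      intro h m hm
      rcases Nat.eq_or_lt_of_le hm with rfl | hlt
      · exact h
      · obtain ⟨j, hj, hk⟩ := h
        exact ih (pred_exists hpre hj hk) m (by omega)
  intro k hk
  exact hdown _ htop k hk

theorem mem_children {parents : List Int} (hv : pvValid parents) {i j' : Nat}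
    (hi : i < parents.length) :
    j' ∈ (pvChildrenRoots parents).1.getD i [] ↔
      (j' < parents.length ∧ pvPar parents j' ≠ -1 ∧
        pvNrm parents.length (pvPar parents j') = i) := by
  rw [(children_spec hv).2.1 i hi]
  simp [List.mem_filter]

theorem mem_roots {parents : List Int} (hv : pvValid parents) {j : Nat} :
    j ∈ (pvChildrenRoots parents).2 ↔ (j < parents.length ∧ pvPar parents j = -1) := by
  rw [(children_spec hv).2.2]
  simp [List.mem_filter]

theorem max?_getD_eq {xs : List Int} {v : Int} (hmem : v ∈ xs) (hle : ∀ x ∈ xs, x ≤ v) :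
    (PySem.List.max? xs (fun x => x)).getD 0 = v := by
  obtain ⟨m, hm⟩ : ∃ m, PySem.List.max? xs (fun x => x) = some m := by
    cases hmq : PySem.List.max? xs (fun x => x) with
    | none =>
      rw [(PySem.List.max?_eq_none_iff xs _).mp hmq] at hmem
      exact absurd hmem (List.not_mem_nil)
    | some m => exact ⟨m, rfl⟩
  rw [hm, Option.getD_some]
  have h1 := hle m (PySem.List.max?_mem hm)
  have h2 := PySem.List.max?_isMax hm v hmem
  omega

theorem bfs_spec {parents : List Int} (hpre : Pre_calc_tree_height parents) :
    ∀ fuel (k : Nat) frontier (depths : List Int),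
      (∀ j', j' ∈ frontier ↔ (j' < parents.length ∧ pvHt parents j' = k)) →
      (∀ x ∈ depths, ∃ m : Nat, x = (m : Int) ∧ m < k) →
      (∀ m : Nat, m < k → (m : Int) ∈ depths) →
      k ≤ pvM parents + 1 →
      pvM parents + 2 ≤ fuel + k →
      (∀ x ∈ bfsLoopB (pvChildrenRoots parents).1 fuel frontier depths (k : Int),
        ∃ m : Nat, x = (m : Int) ∧ m ≤ pvM parents) ∧
      (∀ m : Nat, m ≤ pvM parents →
        (m : Int) ∈ bfsLoopB (pvChildrenRoots parents).1 fuel frontier depths (k : Int)) := by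
  intro fuel
  induction fuel with
  | zero =>
    intro k frontier depths _ _ _ h1 h2
    omega
  | succ fuel ih =>
    intro k frontier depths hfr hdep hall hk1 hk2
    by_cases hkM : k ≤ pvM parents
    · have hne : frontier ≠ [] := by
        obtain ⟨j, hj, hjk⟩ := pvM_attained hpre k hkM
        intro hnil
        rw [hnil] at hfr
        exact absurd ((hfr j).mpr ⟨hj, hjk⟩) (List.not_mem_nil)
      rw [bfsLoopB, if_neg hne]
      have hfr' : ∀ j', j' ∈ frontier.flatMap (fun i => (pvChildrenRoots parents).1.getD i []) ↔
          (j' < parents.length ∧ pvHt parents j' = k + 1) := by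
        intro j'
        rw [List.mem_flatMap]
        constructor
        · rintro ⟨i, hi, hmem⟩
          obtain ⟨hi1, hi2⟩ := (hfr i).mp hi
          obtain ⟨hj', hp, hnrm⟩ := (mem_children hpre.2.1 hi1).mp hmem
          obtain ⟨hrec, _⟩ := pvHt_step (pre_HS hpre _ hj') hp
          rw [hnrm] at hrec
          omega
        · rintro ⟨hj', hh⟩
          have hp : pvPar parents j' ≠ -1 := by
            intro hroot
            rw [pvHt_root hpre.1 hroot] at hh
            omega
          obtain ⟨hrec, _⟩ := pvHt_step (pre_HS hpre _ hj') hp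
          obtain ⟨hpl, hpr⟩ := hpre.2.1 _ (par_mem hj')
          have hilt : pvNrm parents.length (pvPar parents j') < parents.length :=
            pvNrm_lt hpl hpr
          refine ⟨pvNrm parents.length (pvPar parents j'), (hfr _).mpr ⟨hilt, by omega⟩, ?_⟩
          exact (mem_children hpre.2.1 hilt).mpr ⟨hj', hp, rfl⟩
      have hdep' : ∀ x ∈ depths ++ List.replicate frontier.length (k : Int),
          ∃ m : Nat, x = (m : Int) ∧ m < k + 1 := by
        intro x hx
        rcases List.mem_append.mp hx with hx | hx
        · obtain ⟨m, hm1, hm2⟩ := hdep x hx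
          exact ⟨m, hm1, by omega⟩
        · exact ⟨k, List.eq_of_mem_replicate hx, by omega⟩
      have hall' : ∀ m : Nat, m < k + 1 →
          (m : Int) ∈ depths ++ List.replicate frontier.length (k : Int) := by
        intro m hm
        rcases Nat.lt_succ_iff_lt_or_eq.mp hm with hm | rfl
        · exact List.mem_append.mpr (Or.inl (hall m hm))
        · refine List.mem_append.mpr (Or.inr (List.mem_replicate.mpr ⟨?_, rfl⟩))
          simpa [List.length_eq_zero_iff] using hne
      have hres := ih (k+1) _ _ hfr' hdep' hall' (by omega) (by omega)
      have harith : ((k : Int)) + 1 = ((k+1 : Nat) : Int) := by push_cast; ring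
      rw [harith]
      exact hres
    · have hempty : frontier = [] := by
        apply List.eq_nil_iff_forall_not_mem.mpr
        intro j hjmem
        obtain ⟨hj, hh⟩ := (hfr j).mp hjmem
        have := pvM_le hj
        omega
      rw [bfsLoopB, if_pos hempty]
      have hk' : k = pvM parents + 1 := by omega
      constructor
      · intro x hx
        obtain ⟨m, hm1, hm2⟩ := hdep x hx
        exact ⟨m, hm1, by omega⟩
      · intro m hm
        exact hall m (by omega)

theorem calc_B_eq {parents : List Int} (hpre : Pre_calc_tree_height parents) :
    calc_tree_height_alt parents = (pvM parents : Int) := by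
  have hroots : ∀ j', j' ∈ (pvChildrenRoots parents).2 ↔
      (j' < parents.length ∧ pvHt parents j' = 0) := by
    intro j'
    rw [mem_roots hpre.2.1]
    constructor
    · rintro ⟨h1, h2⟩
      exact ⟨h1, pvHt_root hpre.1 h2⟩
    · rintro ⟨h1, h2⟩
      refine ⟨h1, ?_⟩
      by_contra hp
      obtain ⟨hrec, _⟩ := pvHt_step (pre_HS hpre _ h1) hp
      omega
  have hMn : pvM parents + 2 ≤ (parents.length + 1) + 0 := by
    obtain ⟨j, hj, hjM⟩ := pvM_attained hpre (pvM parents) le_rfl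
    have := pvHt_bound (pre_HS hpre j hj)
    omega
  obtain ⟨hel, hin⟩ := bfs_spec hpre (parents.length + 1) 0 (pvChildrenRoots parents).2 []
    hroots (by simp) (by omega) (by omega) hMn
  show (PySem.List.max? (bfsLoopB (pvChildrenRoots parents).1 (parents.length + 1)
    (pvChildrenRoots parents).2 [] ((0 : Nat) : Int)) (fun x => x)).getD 0 = (pvM parents : Int)
  refine max?_getD_eq (hin _ le_rfl) ?_
  intro x hx
  obtain ⟨m, rfl, hm⟩ := hel x hx
  exact_mod_cast hm

theorem calc_A_eq_M {parents : List Int} (hpre : Pre_calc_tree_height parents) :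
    calc_tree_height parents = (pvM parents : Int) := by
  rw [calc_A_eq hpre]
  obtain ⟨jM, hjM, hjMe⟩ := pvM_attained hpre (pvM parents) le_rfl
  refine max?_getD_eq (List.mem_map.mpr ⟨jM, List.mem_range.mpr hjM, by rw [hjMe]⟩) ?_
  intro x hx
  obtain ⟨j0, hj0, rfl⟩ := List.mem_map.mp hx
  exact_mod_cast pvM_le (List.mem_range.mp hj0)

-- ===== VERDICT (by name: the statement is the Claim_ definition above) =====
theorem calc_tree_height_spec : Claim_equal_calc_tree_height := by
  intro parents _ hpre
  unfold Spec_calc_tree_height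
  rw [calc_A_eq_M hpre, calc_B_eq hpre]
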